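-- pv_equiv track=rewrite | github.com/patata22/BOJ | 프로그래머스/lv3/92344. 파괴되지 않은 건물/파괴되지 않은 건물.py | solution
-- ===== SOURCE A (Python) =====
-- def solution(board, skill):
--     answer = 0
--
--     n=len(board)
--     m=len(board[0])
--
--     damage=[[0]*(m+1) for i in range(n+1)]
--
--     for t,x1,y1,x2,y2,degree in skill:
--         if t==1:degree*=-1
--         damage[x1][y1]+=degree
--         damage[x2+1][y2+1]+=degree
--         damage[x1][y2+1]-=degree
--         damage[x2+1][y1]-=degree
--
--     for i in range(n):
--         for j in range(1,m):
--             damage[i][j]+=damage[i][j-1]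
--
--     for i in range(1,n):
--         for j in range(m):
--             damage[i][j]+=damage[i-1][j]
--
--     for i in range(n):
--         for j in range(m):
--             if board[i][j]+damage[i][j]>0:
--                 answer+=1
--
--
--     return answer
-- ===== SOURCE B (Python) =====
-- def solution(board, skill):
--     # per-cell accumulation over skills: no damage grid, no difference array
--     m = len(board[0])
--     def dmg(i, j):
--         total = 0
--         for t, x1, y1, x2, y2, d in skill:
--             if x1 <= i <= x2 and y1 <= j <= y2:
--                 total += -d if t == 1 else d
--         return total
--     return sum(1 for i, row in enumerate(board)
--                  for j in range(m)
--                  if row[j] + dmg(i, j) > 0)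
-- ===== Notes on version B (the rewrite author's own statement) =====
-- stated objective: alternative
-- what changed: B replaces A's 2D difference-array plus two in-place prefix-sum passes over an (n+1)x(m+1) damage table by a direct per-cell scan: for every cell it sums the signed degrees of the skills whose rectangle covers it and counts cells with board+damage > 0, building no table at all.
-- outside the precondition, e.g. on solution([[1]], [[0, -1, 0, -1, 0, 1]]): A returns 0, B returns 1; on solution([[1, 1]], [[0, 0, -1, 0, -1, 2]]): A returns 0, B returns 2
import Mathlib
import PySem

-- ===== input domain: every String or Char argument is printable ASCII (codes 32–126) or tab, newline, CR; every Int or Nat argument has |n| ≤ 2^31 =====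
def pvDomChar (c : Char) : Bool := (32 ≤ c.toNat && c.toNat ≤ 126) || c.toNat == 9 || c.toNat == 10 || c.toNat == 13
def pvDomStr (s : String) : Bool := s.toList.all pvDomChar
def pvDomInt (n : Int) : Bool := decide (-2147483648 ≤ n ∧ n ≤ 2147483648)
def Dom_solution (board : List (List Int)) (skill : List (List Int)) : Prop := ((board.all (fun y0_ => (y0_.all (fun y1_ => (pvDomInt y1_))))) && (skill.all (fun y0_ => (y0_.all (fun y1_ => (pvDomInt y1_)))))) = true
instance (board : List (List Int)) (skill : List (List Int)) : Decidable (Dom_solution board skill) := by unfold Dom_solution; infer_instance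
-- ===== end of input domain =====

-- B replaces A's difference-array + two prefix-sum passes by a direct per-cell scan over the skills
-- (same results on the problem's natural domain stated in Pre_; an alternative, not faster).


-- ===== PORT A =====
-- damage[i][j]  (Python list-of-lists read, Int indices)
def pvGGet (g : List (List Int)) (i j : Int) : Int :=
  PySem.List.pyGetD (PySem.List.pyGetD g i []) j 0

-- damage[i][j] += v  (in-place add, Int indices)
def pvGAdd (g : List (List Int)) (i j : Int) (v : Int) : List (List Int) :=
  PySem.List.pySetD g i (PySem.List.pySetD (PySem.List.pyGetD g i []) j (pvGGet g i j + v))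

def solution (board : List (List Int)) (skill : List (List Int)) : Int :=
  let n : Nat := board.length
  let m : Nat := (PySem.List.pyGetD board 0 []).length
  let damage : List (List Int) := List.replicate (n + 1) (List.replicate (m + 1) 0)
  let damage := skill.foldl (fun g s =>
    match s with
    | [t, x1, y1, x2, y2, degree] =>
      let degree := if t == 1 then -degree else degree
      let g := pvGAdd g x1 y1 degree
      let g := pvGAdd g (x2 + 1) (y2 + 1) degree
      let g := pvGAdd g x1 (y2 + 1) (-degree)
      pvGAdd g (x2 + 1) y1 (-degree)
    | _ => g) damage  -- a row not of length 6 raises ValueError in Python: excluded by Pre_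
  let damage := (PySem.List.pyRange 0 (n : Int) 1).foldl (fun g i =>
    (PySem.List.pyRange 1 (m : Int) 1).foldl (fun g j =>
      pvGAdd g i j (pvGGet g i (j - 1))) g) damage
  let damage := (PySem.List.pyRange 1 (n : Int) 1).foldl (fun g i =>
    (PySem.List.pyRange 0 (m : Int) 1).foldl (fun g j =>
      pvGAdd g i j (pvGGet g (i - 1) j)) g) damage
  (PySem.List.pyRange 0 (n : Int) 1).foldl (fun a i =>
    (PySem.List.pyRange 0 (m : Int) 1).foldl (fun a j =>
      if PySem.List.pyGetD (PySem.List.pyGetD board i []) j 0 + pvGGet damage i j > 0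
      then a + 1 else a) a) 0

-- ===== PORT B =====
-- total damage a single cell (i,j) receives from all skills
def pvDmgAt (skill : List (List Int)) (i j : Int) : Int :=
  skill.foldl (fun total s =>
    match s with
    | [] => total
    | t :: r1 =>
      match r1 with
      | [] => total
      | x1 :: r2 =>
        match r2 with
        | [] => total
        | y1 :: r3 =>
          match r3 with
          | [] => total
          | x2 :: r4 =>
            match r4 with
            | [] => total
            | y2 :: r5 =>
              match r5 with
              | [] => total
              | d :: r6 =>
                match r6 with
                | [] =>
                  if x1 ≤ i ∧ i ≤ x2 ∧ y1 ≤ j ∧ j ≤ y2 then total + (if t == 1 then -d else d)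
                  else total
                | _ :: _ => total) 0

def solution_alt (board : List (List Int)) (skill : List (List Int)) : Int :=
  let m : Nat := (PySem.List.pyGetD board 0 []).length
  (PySem.List.enumerate board 0).foldl (fun acc p =>
    (PySem.List.pyRange 0 (m : Int) 1).foldl (fun acc j =>
      if PySem.List.pyGetD p.2 j 0 + pvDmgAt skill p.1 j > 0 then acc + 1 else acc) acc) 0

-- ===== PRECONDITION & SPEC =====
-- Pre_ is the problem's natural domain: a non-empty rectangular board and skills of the exact
-- shape [t,x1,y1,x2,y2,degree] with 0 ≤ x1 ≤ x2 < n and 0 ≤ y1 ≤ y2 < m.  Outside it A either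
-- raises (empty board, rows shorter than row 0, short skill rows, indices past the grid) or returns a value
-- produced by Python's negative-index wraparound, an artefact of the difference-array layout.
def Pre_solution (board : List (List Int)) (skill : List (List Int)) : Prop :=
  board ≠ [] ∧ (∀ row ∈ board, (board.headD []).length ≤ row.length) ∧
  ∀ s ∈ skill, s.length = 6 ∧
    0 ≤ s.getD 1 0 ∧ s.getD 1 0 ≤ s.getD 3 0 ∧ s.getD 3 0 < (board.length : Int) ∧
    0 ≤ s.getD 2 0 ∧ s.getD 2 0 ≤ s.getD 4 0 ∧ s.getD 4 0 < ((board.headD []).length : Int)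
instance (board : List (List Int)) (skill : List (List Int)) : Decidable (Pre_solution board skill) := by
  unfold Pre_solution; infer_instance

def pvWitness_solution : List (List Int) × List (List Int) :=
  ([[1, 2], [0, 5]], [[1, 0, 0, 1, 1, 1], [0, 1, 0, 1, 1, 2]])

def Spec_solution (board : List (List Int)) (skill : List (List Int)) (out : Int) : Prop := out = solution_alt board skill
instance (board : List (List Int)) (skill : List (List Int)) (out : Int) : Decidable (Spec_solution board skill out) := by unfold Spec_solution; infer_instance

-- ===== CLAIM (what is proved, stated in full; the proofs are below) =====
def Claim_equal_solution : Prop := ∀ (board : List (List Int)) (skill : List (List Int)), Dom_solution board skill → Pre_solution board skill → Spec_solution board skill (solution board skill)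

-- ===== LEMMAS AND PROOFS =====

-- cell read on Nat indices (default-0, default-[] row)
def gg (g : List (List Int)) (i j : Nat) : Int := (g.getD i []).getD j 0

-- rectangular grid of R rows, C columns
def Rect (g : List (List Int)) (R C : Nat) : Prop :=
  g.length = R ∧ ∀ i : Nat, i < R → (g.getD i []).length = C

theorem getD_set_my {α : Type} (l : List α) (i j : Nat) (v d : α) :
    (l.set i v).getD j d = if j = i ∧ i < l.length then v else l.getD j d := by
  rw [List.getD_eq_getElem?_getD, List.getD_eq_getElem?_getD, List.getElem?_set]
  by_cases h : i = j
  · subst h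
    by_cases hl : i < l.length
    · simp [hl]
    · simp [hl]
  · rw [if_neg h, if_neg (by omega)]

theorem gg_pvGAdd (g : List (List Int)) (R C : Nat) (hg : Rect g R C) (a b v : Int)
    (ha0 : 0 ≤ a) (haR : a.toNat < R) (hb0 : 0 ≤ b) (hbC : b.toNat < C) (i j : Nat) :
    gg (pvGAdd g a b v) i j = gg g i j + (if (i : Int) = a ∧ (j : Int) = b then v else 0) := by
  obtain ⟨hlen, hrow⟩ := hg
  have hrl : (g.getD a.toNat []).length = C := hrow _ haR
  unfold pvGAdd pvGGet gg
  rw [PySem.List.pyGetD_of_nonneg _ _ ha0, PySem.List.pyGetD_of_nonneg _ _ hb0,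
      PySem.List.pySetD_of_nonneg _ _ hb0, PySem.List.pySetD_of_nonneg _ _ ha0]
  rw [getD_set_my]
  by_cases hi : i = a.toNat
  · subst hi
    rw [if_pos ⟨rfl, by omega⟩, getD_set_my]
    by_cases hj : j = b.toNat
    · subst hj
      rw [if_pos ⟨rfl, by omega⟩, if_pos ⟨by omega, by omega⟩]
    · rw [if_neg (by omega), if_neg (by omega)]; ring
  · rw [if_neg (by omega), if_neg (by omega)]; ring

theorem rect_pvGAdd (g : List (List Int)) (R C : Nat) (hg : Rect g R C) (a b v : Int)
    (ha0 : 0 ≤ a) (haR : a.toNat < R) (hb0 : 0 ≤ b) :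
    Rect (pvGAdd g a b v) R C := by
  obtain ⟨hlen, hrow⟩ := hg
  unfold pvGAdd
  rw [PySem.List.pySetD_of_nonneg _ _ ha0, PySem.List.pyGetD_of_nonneg _ _ ha0,
      PySem.List.pySetD_of_nonneg _ _ hb0]
  refine ⟨by simpa using hlen, fun i hi => ?_⟩
  rw [getD_set_my]
  split_ifs with h
  · rw [List.length_set]; exact hrow _ (by omega)
  · exact hrow _ hi

theorem gg_pvGGet (g : List (List Int)) (a b : Int) (ha0 : 0 ≤ a) (hb0 : 0 ≤ b) :
    pvGGet g a b = gg g a.toNat b.toNat := by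
  unfold pvGGet gg
  rw [PySem.List.pyGetD_of_nonneg _ _ ha0, PySem.List.pyGetD_of_nonneg _ _ hb0]


theorem ite_and_mul (P Q : Prop) [Decidable P] [Decidable Q] (v : Int) :
    (if P ∧ Q then v else 0) = (if P then (1 : Int) else 0) * (if Q then 1 else 0) * v := by
  by_cases hP : P <;> by_cases hQ : Q <;> simp [hP, hQ]

-- the 4-point difference-array footprint of one skill row at cell (i,j)
def skDelta (s : List Int) (i j : Nat) : Int :=
  match s with
  | [t, x1, y1, x2, y2, d] =>
    (if t == 1 then -d else d) *
    ((if (i : Int) = x1 then 1 else 0) - (if (i : Int) = x2 + 1 then 1 else 0)) *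
    ((if (j : Int) = y1 then 1 else 0) - (if (j : Int) = y2 + 1 then 1 else 0))
  | _ => 0

-- the well-formedness of a skill row, destructured (equivalent to the Pre_ clause)
def skOK (n m : Nat) (s : List Int) : Prop :=
  ∃ t x1 y1 x2 y2 d : Int, s = [t, x1, y1, x2, y2, d] ∧
    0 ≤ x1 ∧ x1 ≤ x2 ∧ x2 < (n : Int) ∧ 0 ≤ y1 ∧ y1 ≤ y2 ∧ y2 < (m : Int)

set_option maxHeartbeats 1600000 in
theorem stage1 (n m : Nat) (skill : List (List Int)) :
    ∀ g : List (List Int), Rect g (n + 1) (m + 1) → (∀ s ∈ skill, skOK n m s) →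
    Rect (skill.foldl (fun g s =>
      match s with
      | [t, x1, y1, x2, y2, degree] =>
        let degree := if t == 1 then -degree else degree
        let g := pvGAdd g x1 y1 degree
        let g := pvGAdd g (x2 + 1) (y2 + 1) degree
        let g := pvGAdd g x1 (y2 + 1) (-degree)
        pvGAdd g (x2 + 1) y1 (-degree)
      | _ => g) g) (n + 1) (m + 1) ∧
    ∀ i j : Nat, gg (skill.foldl (fun g s =>
      match s with
      | [t, x1, y1, x2, y2, degree] =>
        let degree := if t == 1 then -degree else degree
        let g := pvGAdd g x1 y1 degree
        let g := pvGAdd g (x2 + 1) (y2 + 1) degree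
        let g := pvGAdd g x1 (y2 + 1) (-degree)
        pvGAdd g (x2 + 1) y1 (-degree)
      | _ => g) g) i j = gg g i j + (skill.map (fun s => skDelta s i j)).sum := by
  induction skill with
  | nil => intro g hg _; simpa using hg
  | cons s rest ih =>
    intro g hg hok
    obtain ⟨t, x1, y1, x2, y2, d, hs, hx1, hx12, hx2, hy1, hy12, hy2⟩ := hok s (by simp)
    subst hs
    have hx1R : x1.toNat < n + 1 := by omega
    have hx2R : (x2 + 1).toNat < n + 1 := by omega
    have hy1C : y1.toNat < m + 1 := by omega
    have hy2C : (y2 + 1).toNat < m + 1 := by omega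
    have h1 : 0 ≤ x2 + 1 := by omega
    have h2 : 0 ≤ y2 + 1 := by omega
    set v : Int := if t == 1 then -d else d with hv
    set g1 := pvGAdd g x1 y1 v with hg1
    set g2 := pvGAdd g1 (x2 + 1) (y2 + 1) v with hg2
    set g3 := pvGAdd g2 x1 (y2 + 1) (-v) with hg3
    set g4 := pvGAdd g3 (x2 + 1) y1 (-v) with hg4
    have r1 : Rect g1 (n + 1) (m + 1) := rect_pvGAdd g _ _ hg _ _ _ hx1 hx1R hy1
    have r2 : Rect g2 (n + 1) (m + 1) := rect_pvGAdd g1 _ _ r1 _ _ _ h1 hx2R h2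
    have r3 : Rect g3 (n + 1) (m + 1) := rect_pvGAdd g2 _ _ r2 _ _ _ hx1 hx1R h2
    have r4 : Rect g4 (n + 1) (m + 1) := rect_pvGAdd g3 _ _ r3 _ _ _ h1 hx2R hy1
    have hcell : ∀ i j : Nat, gg g4 i j = gg g i j + skDelta [t, x1, y1, x2, y2, d] i j := by
      intro i j
      rw [hg4, gg_pvGAdd g3 _ _ r3 _ _ _ h1 hx2R hy1 hy1C,
          hg3, gg_pvGAdd g2 _ _ r2 _ _ _ hx1 hx1R h2 hy2C,
          hg2, gg_pvGAdd g1 _ _ r1 _ _ _ h1 hx2R h2 hy2C,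
          hg1, gg_pvGAdd g _ _ hg _ _ _ hx1 hx1R hy1 hy1C]
      show _ = _ + skDelta [t, x1, y1, x2, y2, d] i j
      simp only [skDelta, ← hv]
      rw [ite_and_mul, ite_and_mul, ite_and_mul, ite_and_mul]; ring
    have step : (([t, x1, y1, x2, y2, d] :: rest).foldl (fun g s =>
      match s with
      | [t, x1, y1, x2, y2, degree] =>
        let degree := if t == 1 then -degree else degree
        let g := pvGAdd g x1 y1 degree
        let g := pvGAdd g (x2 + 1) (y2 + 1) degree
        let g := pvGAdd g x1 (y2 + 1) (-degree)
        pvGAdd g (x2 + 1) y1 (-degree)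
      | _ => g) g) = (rest.foldl (fun g s =>
      match s with
      | [t, x1, y1, x2, y2, degree] =>
        let degree := if t == 1 then -degree else degree
        let g := pvGAdd g x1 y1 degree
        let g := pvGAdd g (x2 + 1) (y2 + 1) degree
        let g := pvGAdd g x1 (y2 + 1) (-degree)
        pvGAdd g (x2 + 1) y1 (-degree)
      | _ => g) g4) := by
      simp only [List.foldl_cons]; rfl
    obtain ⟨ihR, ihC⟩ := ih g4 r4 (fun s hs => hok s (by simp [hs]))
    rw [step]
    refine ⟨ihR, fun i j => ?_⟩
    rw [ihC i j, hcell i j]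
    simp only [List.map_cons, List.sum_cons]; ring

def rsum (f : Nat → Int) (t : Nat) : Int := ∑ k ∈ Finset.range t, f k

-- inner loop of the first prefix pass: in-place prefix sums along row i, columns 1..t-1
theorem rowloop (n m i : Nat) (hi : i < n + 1) : ∀ t : Nat, t ≤ m → ∀ g, Rect g (n + 1) (m + 1) →
    Rect ((PySem.List.pyRange 1 (t : Int) 1).foldl
      (fun g j => pvGAdd g (i : Int) j (pvGGet g (i : Int) (j - 1))) g) (n + 1) (m + 1) ∧
    ∀ i' j' : Nat, gg ((PySem.List.pyRange 1 (t : Int) 1).foldl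
      (fun g j => pvGAdd g (i : Int) j (pvGGet g (i : Int) (j - 1))) g) i' j' =
      if i' = i ∧ j' < t then rsum (fun k => gg g i k) (j' + 1) else gg g i' j' := by
  intro t
  induction t with
  | zero =>
    intro _ g hg
    rw [PySem.List.pyRange_one_eq_nil (by omega)]
    exact ⟨hg, fun i' j' => by simp⟩
  | succ t ih =>
    intro ht g hg
    rcases Nat.eq_zero_or_pos t with rfl | hpos
    · rw [show ((0 + 1 : Nat) : Int) = 1 by norm_num, PySem.List.pyRange_one_eq_nil le_rfl]
      refine ⟨hg, fun i' j' => ?_⟩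
      by_cases h : i' = i ∧ j' < 0 + 1
      · obtain ⟨rfl, hj⟩ := h
        have hj0 : j' = 0 := by omega
        subst hj0
        rw [if_pos ⟨rfl, by omega⟩]
        simp [rsum]
      · rw [if_neg h]; rfl
    · have hcast : ((t + 1 : Nat) : Int) = (t : Int) + 1 := by push_cast; ring
      rw [hcast, PySem.List.pyRange_one_succ_right (by exact_mod_cast hpos), List.foldl_append]
      obtain ⟨ihR, ihC⟩ := ih (by omega) g hg
      simp only [List.foldl_cons, List.foldl_nil]
      set g' := (PySem.List.pyRange 1 (t : Int) 1).foldl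
        (fun g j => pvGAdd g (i : Int) j (pvGGet g (i : Int) (j - 1))) g with hg'
      have hval : pvGGet g' (i : Int) ((t : Int) - 1) = rsum (fun k => gg g i k) t := by
        have : ((t : Int) - 1) = ((t - 1 : Nat) : Int) := by omega
        rw [this, gg_pvGGet g' _ _ (by omega) (by omega)]
        simp only [Int.toNat_natCast]
        rw [ihC i (t - 1), if_pos ⟨rfl, by omega⟩]
        congr 1
        omega
      refine ⟨rect_pvGAdd g' _ _ ihR _ _ _ (by omega) (by simp; omega) (by omega), fun i' j' => ?_⟩
      rw [gg_pvGAdd g' _ _ ihR _ _ _ (by omega) (by simp; omega) (by omega) (by simp; omega), hval, ihC i' j']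
      by_cases hii : i' = i
      · subst hii
        by_cases hjt : j' = t
        · subst hjt
          rw [if_neg (by omega), if_pos ⟨rfl, rfl⟩, if_pos ⟨rfl, by omega⟩]
          rw [show rsum (fun k => gg g i' k) (j' + 1) = rsum (fun k => gg g i' k) j' + gg g i' j' from Finset.sum_range_succ _ _]
          ring
        · by_cases hjlt : j' < t
          · rw [if_pos ⟨rfl, hjlt⟩, if_neg (by omega), if_pos ⟨rfl, by omega⟩]; ring
          · rw [if_neg (by omega), if_neg (by omega), if_neg (by omega)]; ring
      · rw [if_neg (by omega), if_neg (by omega), if_neg (by omega)]; ring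

-- outer loop of the first prefix pass: rows 0..t-1 get row-prefix sums
theorem rowsloop (n m : Nat) : ∀ t : Nat, t ≤ n → ∀ g, Rect g (n + 1) (m + 1) →
    Rect ((PySem.List.pyRange 0 (t : Int) 1).foldl (fun g i =>
      (PySem.List.pyRange 1 (m : Int) 1).foldl
        (fun g j => pvGAdd g i j (pvGGet g i (j - 1))) g) g) (n + 1) (m + 1) ∧
    ∀ i' j' : Nat, gg ((PySem.List.pyRange 0 (t : Int) 1).foldl (fun g i =>
      (PySem.List.pyRange 1 (m : Int) 1).foldl
        (fun g j => pvGAdd g i j (pvGGet g i (j - 1))) g) g) i' j' =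
      if i' < t ∧ j' < m then rsum (fun k => gg g i' k) (j' + 1) else gg g i' j' := by
  intro t
  induction t with
  | zero =>
    intro _ g hg
    rw [show PySem.List.pyRange 0 ((0 : Nat) : Int) = ([] : List Int) from
      PySem.List.pyRange_one_eq_nil (by omega)]
    exact ⟨hg, fun i' j' => by simp⟩
  | succ t ih =>
    intro ht g hg
    have hcast : ((t + 1 : Nat) : Int) = (t : Int) + 1 := by push_cast; ring
    rw [hcast, show PySem.List.pyRange 0 ((t : Int) + 1) = PySem.List.pyRange 0 (t : Int) ++ [(t : Int)] from
      PySem.List.pyRange_one_succ_right (by omega), List.foldl_append]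
    obtain ⟨ihR, ihC⟩ := ih (by omega) g hg
    simp only [List.foldl_cons, List.foldl_nil]
    set g' := (PySem.List.pyRange 0 (t : Int) 1).foldl (fun g i =>
      (PySem.List.pyRange 1 (m : Int) 1).foldl
        (fun g j => pvGAdd g i j (pvGGet g i (j - 1))) g) g with hg'
    obtain ⟨rowR, rowC⟩ := rowloop n m t (by omega) m le_rfl g' ihR
    refine ⟨rowR, fun i' j' => ?_⟩
    rw [rowC i' j']
    by_cases hii : i' = t
    · subst hii
      by_cases hjm : j' < m
      · rw [if_pos ⟨rfl, hjm⟩, if_pos ⟨by omega, hjm⟩]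
        exact Finset.sum_congr rfl fun k hk => by
          show gg g' i' k = gg g i' k
          rw [ihC i' k, if_neg (by omega)]
      · rw [if_neg (by omega), ihC i' j', if_neg (by omega), if_neg (by omega)]
    · by_cases h : i' < t ∧ j' < m
      · rw [if_neg (by omega), ihC i' j', if_pos h, if_pos ⟨by omega, h.2⟩]
      · rw [if_neg (by omega), ihC i' j', if_neg h, if_neg (by omega)]

-- inner loop of the second prefix pass: row i gets row (i-1) added, columns 0..t-1
theorem colrow (n m i : Nat) (hi1 : 1 ≤ i) (hi : i < n + 1) : ∀ t : Nat, t ≤ m → ∀ g, Rect g (n + 1) (m + 1) →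
    Rect ((PySem.List.pyRange 0 (t : Int) 1).foldl
      (fun g j => pvGAdd g (i : Int) j (pvGGet g ((i : Int) - 1) j)) g) (n + 1) (m + 1) ∧
    ∀ i' j' : Nat, gg ((PySem.List.pyRange 0 (t : Int) 1).foldl
      (fun g j => pvGAdd g (i : Int) j (pvGGet g ((i : Int) - 1) j)) g) i' j' =
      if i' = i ∧ j' < t then gg g i j' + gg g (i - 1) j' else gg g i' j' := by
  intro t
  induction t with
  | zero =>
    intro _ g hg
    rw [PySem.List.pyRange_one_eq_nil (by omega)]
    exact ⟨hg, fun i' j' => by simp⟩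
  | succ t ih =>
    intro ht g hg
    have hcast : ((t + 1 : Nat) : Int) = (t : Int) + 1 := by push_cast; ring
    rw [hcast, PySem.List.pyRange_one_succ_right (by omega), List.foldl_append]
    obtain ⟨ihR, ihC⟩ := ih (by omega) g hg
    simp only [List.foldl_cons, List.foldl_nil]
    set g' := (PySem.List.pyRange 0 (t : Int) 1).foldl
      (fun g j => pvGAdd g (i : Int) j (pvGGet g ((i : Int) - 1) j)) g with hg'
    have hval : pvGGet g' ((i : Int) - 1) (t : Int) = gg g (i - 1) t := by
      have : ((i : Int) - 1) = ((i - 1 : Nat) : Int) := by omega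
      rw [this, gg_pvGGet g' _ _ (by omega) (by omega)]
      simp only [Int.toNat_natCast]
      rw [ihC (i - 1) t, if_neg (by omega)]
    refine ⟨rect_pvGAdd g' _ _ ihR _ _ _ (by omega) (by simp; omega) (by omega), fun i' j' => ?_⟩
    rw [gg_pvGAdd g' _ _ ihR _ _ _ (by omega) (by simp; omega) (by omega) (by simp; omega), hval, ihC i' j']
    by_cases hii : i' = i
    · subst hii
      by_cases hjt : j' = t
      · subst hjt
        rw [if_neg (by omega), if_pos ⟨rfl, rfl⟩, if_pos ⟨rfl, by omega⟩]
      · by_cases hjlt : j' < t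
        · rw [if_pos ⟨rfl, hjlt⟩, if_neg (by omega), if_pos ⟨rfl, by omega⟩]; ring
        · rw [if_neg (by omega), if_neg (by omega), if_neg (by omega)]; ring
    · rw [if_neg (by omega), if_neg (by omega), if_neg (by omega)]; ring

-- outer loop of the second prefix pass: rows 0..t-1 hold column prefix sums (columns < m)
theorem colsloop (n m : Nat) : ∀ t : Nat, t ≤ n → ∀ g, Rect g (n + 1) (m + 1) →
    Rect ((PySem.List.pyRange 1 (t : Int) 1).foldl (fun g i =>
      (PySem.List.pyRange 0 (m : Int) 1).foldl
        (fun g j => pvGAdd g i j (pvGGet g (i - 1) j)) g) g) (n + 1) (m + 1) ∧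
    ∀ i' j' : Nat, gg ((PySem.List.pyRange 1 (t : Int) 1).foldl (fun g i =>
      (PySem.List.pyRange 0 (m : Int) 1).foldl
        (fun g j => pvGAdd g i j (pvGGet g (i - 1) j)) g) g) i' j' =
      if i' < t ∧ j' < m then rsum (fun k => gg g k j') (i' + 1) else gg g i' j' := by
  intro t
  induction t with
  | zero =>
    intro _ g hg
    rw [show PySem.List.pyRange 1 ((0 : Nat) : Int) = ([] : List Int) from
      PySem.List.pyRange_one_eq_nil (by omega)]
    exact ⟨hg, fun i' j' => by simp⟩
  | succ t ih =>
    intro ht g hg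
    rcases Nat.eq_zero_or_pos t with rfl | hpos
    · rw [show PySem.List.pyRange 1 (((0 + 1 : Nat)) : Int) = ([] : List Int) from
        PySem.List.pyRange_one_eq_nil (by omega)]
      refine ⟨hg, fun i' j' => ?_⟩
      by_cases h : i' < 0 + 1 ∧ j' < m
      · obtain ⟨hi, hj⟩ := h
        have hi0 : i' = 0 := by omega
        subst hi0
        rw [if_pos ⟨by omega, hj⟩]
        simp [rsum]
      · rw [if_neg h]; rfl
    · have hcast : ((t + 1 : Nat) : Int) = (t : Int) + 1 := by push_cast; ring
      rw [hcast, show PySem.List.pyRange 1 ((t : Int) + 1) = PySem.List.pyRange 1 (t : Int) ++ [(t : Int)] from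
        PySem.List.pyRange_one_succ_right (by exact_mod_cast hpos), List.foldl_append]
      obtain ⟨ihR, ihC⟩ := ih (by omega) g hg
      simp only [List.foldl_cons, List.foldl_nil]
      set g' := (PySem.List.pyRange 1 (t : Int) 1).foldl (fun g i =>
        (PySem.List.pyRange 0 (m : Int) 1).foldl
          (fun g j => pvGAdd g i j (pvGGet g (i - 1) j)) g) g with hg'
      obtain ⟨rowR, rowC⟩ := colrow n m t (by omega) (by omega) m le_rfl g' ihR
      refine ⟨rowR, fun i' j' => ?_⟩
      rw [rowC i' j']
      by_cases hii : i' = t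
      · subst hii
        by_cases hjm : j' < m
        · rw [if_pos ⟨rfl, hjm⟩, ihC i' j', if_neg (by omega), ihC (i' - 1) j',
              if_pos ⟨by omega, hjm⟩, if_pos ⟨by omega, hjm⟩]
          rw [show rsum (fun k => gg g k j') (i' + 1) = rsum (fun k => gg g k j') i' + gg g i' j' from Finset.sum_range_succ _ _]
          rw [show i' - 1 + 1 = i' by omega]
          ring
        · rw [if_neg (by omega), ihC i' j', if_neg (by omega), if_neg (by omega)]
      · by_cases h : i' < t ∧ j' < m
        · rw [if_neg (by omega), ihC i' j', if_pos h, if_pos ⟨by omega, h.2⟩]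
        · rw [if_neg (by omega), ihC i' j', if_neg h, if_neg (by omega)]

-- initial damage grid
theorem rect_init (n m : Nat) :
    Rect (List.replicate (n + 1) (List.replicate (m + 1) (0 : Int))) (n + 1) (m + 1) :=
  ⟨by simp, fun i hi => by rw [List.getD_replicate _ hi]; simp⟩

theorem gg_init (n m i j : Nat) :
    gg (List.replicate (n + 1) (List.replicate (m + 1) (0 : Int))) i j = 0 := by
  unfold gg
  rcases Nat.lt_or_ge i (n + 1) with h | h
  · rw [List.getD_replicate _ h]
    rcases Nat.lt_or_ge j (m + 1) with h2 | h2
    · rw [List.getD_replicate _ h2]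
    · rw [List.getD_eq_getElem?_getD, List.getElem?_eq_none (by simpa using h2)]; rfl
  · have h0 : (List.replicate (n + 1) (List.replicate (m + 1) (0 : Int))).getD i [] = [] := by
      rw [List.getD_eq_getElem?_getD, List.getElem?_eq_none (by simpa using h)]; rfl
    rw [h0]; rfl

theorem indSum (c : Int) : ∀ t : Nat,
    (∑ k ∈ Finset.range t, if (k : Int) = c then (1 : Int) else 0) =
      if 0 ≤ c ∧ c < (t : Int) then 1 else 0 := by
  intro t
  induction t with
  | zero => simp
  | succ t ih =>
    rw [Finset.sum_range_succ, ih]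
    push_cast
    split_ifs <;> omega

theorem mapsum_swap (T : Nat) (l : List (List Int)) (F : List Int → Nat → Int) :
    (∑ k ∈ Finset.range T, (l.map (fun s => F s k)).sum) =
      (l.map (fun s => ∑ k ∈ Finset.range T, F s k)).sum := by
  induction l with
  | nil => simp
  | cons s rest ih => simp [Finset.sum_add_distrib, ih]

-- B's per-skill contribution at a cell
def ctb (i j : Int) (s : List Int) : Int :=
  match s with
  | [t, x1, y1, x2, y2, d] =>
    if x1 ≤ i ∧ i ≤ x2 ∧ y1 ≤ j ∧ j ≤ y2 then (if t == 1 then -d else d) else 0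
  | _ => 0

-- double prefix sum of a skill's difference-array footprint = its rectangle contribution
theorem sum2_delta (n m : Nat) (s : List Int) (hs : skOK n m s) (i j : Nat) :
    (∑ k ∈ Finset.range (i + 1), ∑ l ∈ Finset.range (j + 1), skDelta s k l) =
      ctb (i : Int) (j : Int) s := by
  obtain ⟨t, x1, y1, x2, y2, d, rfl, hx1, hx12, hx2, hy1, hy12, hy2⟩ := hs
  simp only [skDelta, ctb]
  have step1 : ∀ k : Nat,
      (∑ l ∈ Finset.range (j + 1), (if t == 1 then -d else d) *
        ((if (k : Int) = x1 then (1 : Int) else 0) - (if (k : Int) = x2 + 1 then 1 else 0)) *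
        ((if (l : Int) = y1 then (1 : Int) else 0) - (if (l : Int) = y2 + 1 then 1 else 0))) =
      (if t == 1 then -d else d) *
        ((if (k : Int) = x1 then (1 : Int) else 0) - (if (k : Int) = x2 + 1 then 1 else 0)) *
        ((if 0 ≤ y1 ∧ y1 < ((j + 1 : Nat) : Int) then (1 : Int) else 0) -
         (if 0 ≤ y2 + 1 ∧ y2 + 1 < ((j + 1 : Nat) : Int) then 1 else 0)) := by
    intro k
    rw [← Finset.mul_sum, Finset.sum_sub_distrib, indSum y1 (j + 1), indSum (y2 + 1) (j + 1)]
  rw [Finset.sum_congr rfl (fun k _ => step1 k), ← Finset.sum_mul, ← Finset.mul_sum,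
      Finset.sum_sub_distrib, indSum x1 (i + 1), indSum (x2 + 1) (i + 1)]
  push_cast
  split_ifs <;> first | ring1 | omega

-- B's per-cell loop as a sum of per-skill contributions
theorem pvDmgAt_sum (n m : Nat) (i j : Int) :
    ∀ skill : List (List Int), (∀ s ∈ skill, skOK n m s) → ∀ a : Int,
skill.foldl (fun total s =>
      match s with
      | [] => total
      | t :: r1 =>
        match r1 with
        | [] => total
        | x1 :: r2 =>
          match r2 with
          | [] => total
          | y1 :: r3 =>
            match r3 with
            | [] => total
            | x2 :: r4 =>
              match r4 with
              | [] => total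
              | y2 :: r5 =>
                match r5 with
                | [] => total
                | d :: r6 =>
                  match r6 with
                  | [] =>
                    if x1 ≤ i ∧ i ≤ x2 ∧ y1 ≤ j ∧ j ≤ y2 then total + (if t == 1 then -d else d)
                    else total
                  | _ :: _ => total) a = a + (skill.map (ctb i j)).sum := by
  intro skill
  induction skill with
  | nil => intro _ a; simp
  | cons s rest ih =>
    intro hok a
    obtain ⟨t, x1, y1, x2, y2, d, rfl, -⟩ := hok s (by simp)
    simp only [List.foldl_cons, List.map_cons, List.sum_cons]
    rw [ih (fun s hs => hok s (by simp [hs]))]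
    simp only [ctb]
    split_ifs <;> ring

theorem pvDmgAt_eq (n m : Nat) (i j : Int) (skill : List (List Int))
    (hok : ∀ s ∈ skill, skOK n m s) :
    pvDmgAt skill i j = (skill.map (ctb i j)).sum := by
  unfold pvDmgAt
  rw [pvDmgAt_sum n m i j skill hok 0, zero_add]

-- A's counting loop, inner
theorem countA_inner (board G : List (List Int)) (i : Int) (hi : 0 ≤ i) : ∀ (t : Nat) (a : Int),
    (PySem.List.pyRange 0 (t : Int) 1).foldl (fun a j =>
      if PySem.List.pyGetD (PySem.List.pyGetD board i []) j 0 + pvGGet G i j > 0 then a + 1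
      else a) a =
    a + ∑ j ∈ Finset.range t, (if gg board i.toNat j + gg G i.toNat j > 0 then (1 : Int) else 0) := by
  intro t
  induction t with
  | zero =>
    intro a
    rw [show PySem.List.pyRange 0 ((0 : Nat) : Int) = ([] : List Int) from
      PySem.List.pyRange_one_eq_nil (by omega)]
    simp
  | succ t ih =>
    intro a
    have hcast : ((t + 1 : Nat) : Int) = (t : Int) + 1 := by push_cast; ring
    rw [hcast, show PySem.List.pyRange 0 ((t : Int) + 1) = PySem.List.pyRange 0 (t : Int) ++ [(t : Int)] from
      PySem.List.pyRange_one_succ_right (by omega), List.foldl_append, ih a]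
    simp only [List.foldl_cons, List.foldl_nil]
    rw [PySem.List.pyGetD_of_nonneg _ _ hi, PySem.List.pyGetD_of_nonneg _ _ (by omega : (0:Int) ≤ (t : Int)),
        gg_pvGGet G _ _ hi (by omega)]
    simp only [Int.toNat_natCast]
    show (if gg board i.toNat t + gg G i.toNat t > 0 then _ + 1 else _) = _
    rw [Finset.sum_range_succ]
    by_cases hc : gg board i.toNat t + gg G i.toNat t > 0
    · rw [if_pos hc, if_pos hc]; ring
    · rw [if_neg hc, if_neg hc]; ring

-- A's counting loop, outer
theorem countA (board G : List (List Int)) (m : Nat) : ∀ (t : Nat) (a : Int),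
    (PySem.List.pyRange 0 (t : Int) 1).foldl (fun a i =>
      (PySem.List.pyRange 0 (m : Int) 1).foldl (fun a j =>
        if PySem.List.pyGetD (PySem.List.pyGetD board i []) j 0 + pvGGet G i j > 0 then a + 1
        else a) a) a =
    a + ∑ i ∈ Finset.range t, ∑ j ∈ Finset.range m,
      (if gg board i j + gg G i j > 0 then (1 : Int) else 0) := by
  intro t
  induction t with
  | zero =>
    intro a
    rw [show PySem.List.pyRange 0 ((0 : Nat) : Int) = ([] : List Int) from
      PySem.List.pyRange_one_eq_nil (by omega)]
    simp
  | succ t ih =>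
    intro a
    have hcast : ((t + 1 : Nat) : Int) = (t : Int) + 1 := by push_cast; ring
    rw [hcast, show PySem.List.pyRange 0 ((t : Int) + 1) = PySem.List.pyRange 0 (t : Int) ++ [(t : Int)] from
      PySem.List.pyRange_one_succ_right (by omega), List.foldl_append, ih a]
    simp only [List.foldl_cons, List.foldl_nil]
    rw [countA_inner board G (t : Int) (by omega) m]
    simp only [Int.toNat_natCast]
    rw [Finset.sum_range_succ]
    ring_nf

-- B's counting loop, inner (over the columns 0..m-1 of one row)
theorem countB_inner (skill : List (List Int)) (i : Int) (row : List Int) : ∀ (t : Nat) (a : Int),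
    (PySem.List.pyRange 0 (t : Int) 1).foldl (fun acc j =>
      if PySem.List.pyGetD row j 0 + pvDmgAt skill i j > 0 then acc + 1 else acc) a =
    a + ∑ j ∈ Finset.range t,
      (if row.getD j 0 + pvDmgAt skill i (j : Int) > 0 then (1 : Int) else 0) := by
  intro t
  induction t with
  | zero =>
    intro a
    rw [show PySem.List.pyRange 0 ((0 : Nat) : Int) = ([] : List Int) from
      PySem.List.pyRange_one_eq_nil (by omega)]
    simp
  | succ t ih =>
    intro a
    have hcast : ((t + 1 : Nat) : Int) = (t : Int) + 1 := by push_cast; ring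
    rw [hcast, show PySem.List.pyRange 0 ((t : Int) + 1) = PySem.List.pyRange 0 (t : Int) ++ [(t : Int)] from
      PySem.List.pyRange_one_succ_right (by omega), List.foldl_append, ih a]
    simp only [List.foldl_cons, List.foldl_nil]
    rw [PySem.List.pyGetD_of_nonneg _ _ (by omega : (0:Int) ≤ (t : Int))]
    simp only [Int.toNat_natCast]
    rw [Finset.sum_range_succ]
    by_cases hc : row.getD t 0 + pvDmgAt skill i (t : Int) > 0
    · rw [if_pos hc, if_pos hc]; ring
    · rw [if_neg hc, if_neg hc]; ring

-- B's counting loop, outer (over the enumerated board)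
theorem countB (skill : List (List Int)) (m : Nat) : ∀ (rows : List (List Int)) (s acc : Int),
    (PySem.List.enumerate rows s).foldl (fun acc p =>
      (PySem.List.pyRange 0 (m : Int) 1).foldl (fun acc j =>
        if PySem.List.pyGetD p.2 j 0 + pvDmgAt skill p.1 j > 0 then acc + 1 else acc) acc) acc =
    acc + ∑ i ∈ Finset.range rows.length, ∑ j ∈ Finset.range m,
      (if (rows.getD i []).getD j 0 + pvDmgAt skill (s + (i : Int)) (j : Int) > 0
       then (1 : Int) else 0) := by
  intro rows
  induction rows with
  | nil => intro s acc; simp [PySem.List.enumerate_nil]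
  | cons r rest ih =>
    intro s acc
    rw [PySem.List.enumerate_cons, List.foldl_cons]
    show (PySem.List.enumerate rest (s + 1)).foldl _
      ((PySem.List.pyRange 0 (m : Int) 1).foldl (fun acc j =>
        if PySem.List.pyGetD r j 0 + pvDmgAt skill s j > 0 then acc + 1 else acc) acc) = _
    rw [countB_inner skill s r m acc, ih (s + 1)]
    rw [show (r :: rest).length = rest.length + 1 from rfl, Finset.sum_range_succ']
    simp only [List.getD_cons_zero, List.getD_cons_succ]
    have hsh : ∀ i : Nat, s + ((i : Int) + 1) = s + 1 + (i : Int) := by intro i; ring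
    have hcast2 : ∀ i : Nat, (((i + 1 : Nat)) : Int) = (i : Int) + 1 := by intro i; push_cast; ring
    simp only [hcast2, hsh]
    rw [show s + ((0 : Nat) : Int) = s by push_cast; ring]
    ring

-- the Pre_ clause for a skill row implies its destructured form
theorem pre_to_skOK (n m : Nat) (s : List Int)
    (h : s.length = 6 ∧ 0 ≤ s.getD 1 0 ∧ s.getD 1 0 ≤ s.getD 3 0 ∧ s.getD 3 0 < (n : Int) ∧
      0 ≤ s.getD 2 0 ∧ s.getD 2 0 ≤ s.getD 4 0 ∧ s.getD 4 0 < (m : Int)) : skOK n m s := by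
  obtain ⟨hlen, h1, h2, h3, h4, h5, h6⟩ := h
  rcases s with _ | ⟨t, _ | ⟨x1, _ | ⟨y1, _ | ⟨x2, _ | ⟨y2, _ | ⟨d, _ | ⟨e, rest⟩⟩⟩⟩⟩⟩⟩ <;>
    simp_all [skOK]

-- the fully prefix-summed damage grid agrees with B's per-cell damage on every board cell
theorem grid_final (n m : Nat) (skill : List (List Int)) (hOK : ∀ s ∈ skill, skOK n m s)
    (k l : Nat) (hk : k < n) (hl : l < m) :
    gg ((PySem.List.pyRange 1 (n : Int) 1).foldl (fun g i =>
        (PySem.List.pyRange 0 (m : Int) 1).foldl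
          (fun g j => pvGAdd g i j (pvGGet g (i - 1) j)) g)
      ((PySem.List.pyRange 0 (n : Int) 1).foldl (fun g i =>
        (PySem.List.pyRange 1 (m : Int) 1).foldl
          (fun g j => pvGAdd g i j (pvGGet g i (j - 1))) g)
      (skill.foldl (fun g s =>
        match s with
        | [t, x1, y1, x2, y2, degree] =>
          let degree := if t == 1 then -degree else degree
          let g := pvGAdd g x1 y1 degree
          let g := pvGAdd g (x2 + 1) (y2 + 1) degree
          let g := pvGAdd g x1 (y2 + 1) (-degree)
          pvGAdd g (x2 + 1) y1 (-degree)
        | _ => g) (List.replicate (n + 1) (List.replicate (m + 1) 0))))) k l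
    = pvDmgAt skill (k : Int) (l : Int) := by
  set G1 := skill.foldl (fun g s =>
    match s with
    | [t, x1, y1, x2, y2, degree] =>
      let degree := if t == 1 then -degree else degree
      let g := pvGAdd g x1 y1 degree
      let g := pvGAdd g (x2 + 1) (y2 + 1) degree
      let g := pvGAdd g x1 (y2 + 1) (-degree)
      pvGAdd g (x2 + 1) y1 (-degree)
    | _ => g) (List.replicate (n + 1) (List.replicate (m + 1) 0)) with hG1
  set G2 := (PySem.List.pyRange 0 (n : Int) 1).foldl (fun g i =>
    (PySem.List.pyRange 1 (m : Int) 1).foldl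
      (fun g j => pvGAdd g i j (pvGGet g i (j - 1))) g) G1 with hG2
  obtain ⟨R1, C1⟩ := stage1 n m skill _ (rect_init n m) hOK
  obtain ⟨R2, C2⟩ := rowsloop n m n le_rfl G1 R1
  obtain ⟨R3, C3⟩ := colsloop n m n le_rfl G2 R2
  have hC2 : ∀ p ∈ Finset.range (k + 1), gg G2 p l = ∑ q ∈ Finset.range (l + 1), gg G1 p q :=
    fun p hp => by
      rw [C2 p l, if_pos ⟨by have := Finset.mem_range.mp hp; omega, hl⟩]; rfl
  have hC1 : ∀ p ∈ Finset.range (k + 1),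
      (∑ q ∈ Finset.range (l + 1), gg G1 p q) =
        ∑ q ∈ Finset.range (l + 1), (skill.map (fun s => skDelta s p q)).sum :=
    fun p _ => Finset.sum_congr rfl (fun q _ => by rw [C1 p q, gg_init n m p q, zero_add])
  calc gg ((PySem.List.pyRange 1 (n : Int) 1).foldl (fun g i =>
        (PySem.List.pyRange 0 (m : Int) 1).foldl
          (fun g j => pvGAdd g i j (pvGGet g (i - 1) j)) g) G2) k l
      = rsum (fun p => gg G2 p l) (k + 1) := by rw [C3 k l, if_pos ⟨hk, hl⟩]
    _ = ∑ p ∈ Finset.range (k + 1), gg G2 p l := rfl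
    _ = ∑ p ∈ Finset.range (k + 1), ∑ q ∈ Finset.range (l + 1), gg G1 p q :=
        Finset.sum_congr rfl hC2
    _ = ∑ p ∈ Finset.range (k + 1), ∑ q ∈ Finset.range (l + 1),
          (skill.map (fun s => skDelta s p q)).sum := Finset.sum_congr rfl hC1
    _ = ∑ p ∈ Finset.range (k + 1),
          (skill.map (fun s => ∑ q ∈ Finset.range (l + 1), skDelta s p q)).sum :=
        Finset.sum_congr rfl (fun p _ => mapsum_swap (l + 1) skill (fun s q => skDelta s p q))
    _ = (skill.map (fun s => ∑ p ∈ Finset.range (k + 1), ∑ q ∈ Finset.range (l + 1),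
          skDelta s p q)).sum :=
        mapsum_swap (k + 1) skill (fun s p => ∑ q ∈ Finset.range (l + 1), skDelta s p q)
    _ = (skill.map (ctb (k : Int) (l : Int))).sum := by
        rw [List.map_congr_left (fun s hs => sum2_delta n m s (hOK s hs) k l)]
    _ = pvDmgAt skill (k : Int) (l : Int) :=
        (pvDmgAt_eq n m (k : Int) (l : Int) skill hOK).symm

-- ===== VERDICT (by name: the statement is the Claim_ definition above) =====
theorem solution_spec : Claim_equal_solution := by
  unfold Claim_equal_solution
  intro board skill _ hpre
  unfold Spec_solution
  obtain ⟨hne, hrows, hsk⟩ := hpre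
  have hb0 : (PySem.List.pyGetD board 0 []) = board.headD [] := by
    rw [PySem.List.pyGetD_of_nonneg _ _ le_rfl]
    rcases board with _ | ⟨r, rest⟩
    · cases hne rfl
    · rfl
  show solution board skill = solution_alt board skill
  simp only [solution, solution_alt]
  rw [hb0]
  set n := board.length with hn
  set m := (board.headD []).length with hm
  have hn1 : 0 < n := by
    rcases board with _ | ⟨r, rest⟩
    · cases hne rfl
    · simp [hn]
  have hOK : ∀ s ∈ skill, skOK n m s := fun s hs => pre_to_skOK n m s (hsk s hs)
  rw [countA board _ m n 0, countB skill m board 0 0]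
  congr 1
  refine Finset.sum_congr rfl fun i hi => ?_
  have hin : i < n := Finset.mem_range.mp hi
  refine Finset.sum_congr rfl fun j hj => ?_
  have hjm : j < m := Finset.mem_range.mp hj
  rw [grid_final n m skill hOK i j hin hjm]
  show (if gg board i j + pvDmgAt skill (i : Int) (j : Int) > 0 then (1 : Int) else 0) =
    (if gg board i j + pvDmgAt skill ((0 : Int) + (i : Int)) (j : Int) > 0 then (1 : Int) else 0)
  rw [show (0 : Int) + (i : Int) = (i : Int) by ring]
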